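-- pv_equiv track=rewrite | github.com/BBbibiburst/nlpLab1 | score.py | getInterval_result
-- ===== SOURCE A (Python) =====
-- def getInterval_result(line, text):
--     interval = []
--     line_split = line[:-1].split('/  ')[:-1]
--     pos = 0
--     for word in line_split:
--         interval.append((pos, pos + len(word) - 1))
--         pos += len(word)
--     return interval
-- ===== SOURCE B (Python) =====
-- def getInterval_result(line, text):
--     words = line[:-1].split('/  ')[:-1]
--     lengths = [len(w) for w in words]
--     # prefix-sum table of start positions
--     starts = [0]
--     for L in lengths:
--         starts.append(starts[-1] + L)
--     starts = starts[:-1]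
--     return [(s, s + L - 1) for s, L in zip(starts, lengths)]
-- ===== Notes on version B (the rewrite author's own statement) =====
-- stated objective: alternative
-- what changed: Replaces the single accumulator loop by a three-phase table construction: a lengths table, an explicit prefix-sum table of start positions, and a final zip pass pairing each start with its length.
import Mathlib
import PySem

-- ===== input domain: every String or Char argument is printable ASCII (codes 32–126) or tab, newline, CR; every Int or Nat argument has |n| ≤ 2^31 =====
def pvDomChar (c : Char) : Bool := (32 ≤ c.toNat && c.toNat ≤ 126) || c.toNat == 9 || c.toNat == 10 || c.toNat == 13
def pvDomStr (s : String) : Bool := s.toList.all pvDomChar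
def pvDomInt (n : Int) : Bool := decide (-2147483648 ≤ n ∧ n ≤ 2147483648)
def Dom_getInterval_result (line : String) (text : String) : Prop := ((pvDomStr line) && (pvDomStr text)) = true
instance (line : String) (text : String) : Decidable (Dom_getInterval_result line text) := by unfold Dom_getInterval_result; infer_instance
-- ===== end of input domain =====

-- B replaces A's single accumulator loop by explicit lengths and prefix-sum start tables zipped in a final pass (alternative decomposition, same cost).

-- ===== PORT A =====
-- line[:-1].split('/  ')[:-1]; the separator is nonempty so split? always returns some.
def getInterval_result (line : String) (text : String) : List (Int × Int) :=
  let line_split : List String :=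
    PySem.List.slice ((PySem.Str.split? (PySem.Str.slice line none (some (-1))) "/  ").getD []) none (some (-1))
  (line_split.foldl
    (fun (st : List (Int × Int) × Int) word =>
      (st.1 ++ [(st.2, st.2 + PySem.Str.len word - 1)], st.2 + PySem.Str.len word))
    ([], 0)).1

-- ===== PORT B =====
def getInterval_result_alt (line : String) (text : String) : List (Int × Int) :=
  let words : List String :=
    PySem.List.slice ((PySem.Str.split? (PySem.Str.slice line none (some (-1))) "/  ").getD []) none (some (-1))
  let lengths : List Int := words.map (fun w => PySem.Str.len w)
  -- starts.append(starts[-1] + L): starts is always nonempty, so starts[-1] never raises; getD 0 is unreachable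
  let starts0 : List Int :=
    lengths.foldl (fun (st : List Int) L => st ++ [(PySem.List.pyGet? st (-1)).getD 0 + L]) [0]
  let starts : List Int := PySem.List.slice starts0 none (some (-1))
  (starts.zip lengths).map (fun p => (p.1, p.1 + p.2 - 1))

-- ===== PRECONDITION & SPEC =====
def Spec_getInterval_result (line : String) (text : String) (out : List (Int × Int)) : Prop := out = getInterval_result_alt line text
instance (line : String) (text : String) (out : List (Int × Int)) : Decidable (Spec_getInterval_result line text out) := by unfold Spec_getInterval_result; infer_instance

-- ===== CLAIM (what is proved, stated in full; the proofs are below) =====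
def Claim_equal_getInterval_result : Prop := ∀ (line : String) (text : String), Dom_getInterval_result line text → Spec_getInterval_result line text (getInterval_result line text)

-- ===== LEMMAS AND PROOFS =====

-- intended intervals for word list ws starting at position pos
def pvBuild (ws : List String) (pos : Int) : List (Int × Int) :=
  match ws with
  | [] => []
  | w :: ws' => (pos, pos + PySem.Str.len w - 1) :: pvBuild ws' (pos + PySem.Str.len w)

-- the running suffix of the prefix-sum table after position pos
def pvSums (pos : Int) (ls : List Int) : List Int :=
  match ls with
  | [] => []
  | l :: ls' => (pos + l) :: pvSums (pos + l) ls'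

lemma lemA (ws : List String) : ∀ (acc : List (Int × Int)) (pos : Int),
    (ws.foldl (fun (st : List (Int × Int) × Int) word =>
      (st.1 ++ [(st.2, st.2 + PySem.Str.len word - 1)], st.2 + PySem.Str.len word)) (acc, pos)).1
      = acc ++ pvBuild ws pos := by
  induction ws with
  | nil => intro acc pos; simp [pvBuild]
  | cons w ws ih =>
    intro acc pos
    simp only [List.foldl_cons]
    rw [ih]
    simp [pvBuild]

lemma lemB0 (ls : List Int) : ∀ (st : List Int) (x : Int),
    ls.foldl (fun (st : List Int) L => st ++ [(PySem.List.pyGet? st (-1)).getD 0 + L]) (st ++ [x])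
      = (st ++ [x]) ++ pvSums x ls := by
  induction ls with
  | nil => intro st x; simp [pvSums]
  | cons l ls ih =>
    intro st x
    simp only [List.foldl, PySem.List.pyGet?_neg_one_append_singleton, Option.getD_some, pvSums]
    have := ih (st ++ [x]) (x + l)
    simpa using this

lemma lemB (ws : List String) : ∀ (pos : Int),
    (((pos :: pvSums pos (ws.map (fun w => PySem.Str.len w))).dropLast).zip
        (ws.map (fun w => PySem.Str.len w))).map (fun p => (p.1, p.1 + p.2 - 1))
      = pvBuild ws pos := by
  induction ws with
  | nil => intro pos; simp [pvSums, pvBuild]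
  | cons w ws ih =>
    intro pos
    simp only [List.map_cons, pvSums, pvBuild, List.dropLast_cons₂, List.zip_cons_cons]
    exact congrArg _ (ih (pos + PySem.Str.len w))

lemma pvKey (ws : List String) :
    (ws.foldl (fun (st : List (Int × Int) × Int) word =>
      (st.1 ++ [(st.2, st.2 + PySem.Str.len word - 1)], st.2 + PySem.Str.len word)) ([], 0)).1
    = ((PySem.List.slice ((ws.map (fun w => PySem.Str.len w)).foldl
          (fun (st : List Int) L => st ++ [(PySem.List.pyGet? st (-1)).getD 0 + L]) [0]) none (some (-1))).zip
        (ws.map (fun w => PySem.Str.len w))).map (fun p => (p.1, p.1 + p.2 - 1)) := by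
  have hA := lemA ws [] 0
  have h0 := lemB0 (ws.map (fun w => PySem.Str.len w)) [] 0
  simp only [List.nil_append] at hA h0
  rw [hA, h0, PySem.List.slice_to_neg_one]
  exact (lemB ws 0).symm

-- ===== VERDICT (by name: the statement is the Claim_ definition above) =====
theorem getInterval_result_spec : Claim_equal_getInterval_result := by
  intro line text _
  unfold Spec_getInterval_result getInterval_result getInterval_result_alt
  exact pvKey (PySem.List.slice ((PySem.Str.split? (PySem.Str.slice line none (some (-1))) "/  ").getD []) none (some (-1)))
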